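-- pv_equiv track=rewrite | github.com/Hatosabre/CTF | Google_CTF_2019/Reverse Cellular Automata/__init__.py | rule126
-- ===== SOURCE A (Python) =====
-- n = 64
--
-- def rule126(que):
--     ans = 0
--     for i in range(n):
--         jd = 0
--         for j in range(-1, 2):
--             jd += que >> ((i + j) % n) & 1
--
--         if 0 < jd < 3:
--             ans |= 1 << i
--
--     return ans
-- ===== SOURCE B (Python) =====
-- n = 64
--
-- def rule126(que):
--     # One rule-126 step on all 64 cells at once with bitwise word operations:
--     # a cell becomes 1 exactly when its three circular neighbours are not all equal.
--     mask = (1 << n) - 1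
--     m = que & mask
--     l = ((m >> 1) | (m << (n - 1))) & mask
--     r = ((m << 1) | (m >> (n - 1))) & mask
--     return (l | m | r) ^ (l & m & r)
-- ===== Notes on version B (the rewrite author's own statement) =====
-- stated objective: alternative
-- what changed: A's per-cell loop over the 64 cells (with an inner 3-neighbour loop and per-cell OR into the answer) is replaced by a loop-free bitwise formula: mask que to 64 bits, form the two one-bit circular rotations l and r of the word m, and return (l|m|r)^(l&m&r), which sets a cell exactly when its three circular neighbours are not all equal.
import Mathlib
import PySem

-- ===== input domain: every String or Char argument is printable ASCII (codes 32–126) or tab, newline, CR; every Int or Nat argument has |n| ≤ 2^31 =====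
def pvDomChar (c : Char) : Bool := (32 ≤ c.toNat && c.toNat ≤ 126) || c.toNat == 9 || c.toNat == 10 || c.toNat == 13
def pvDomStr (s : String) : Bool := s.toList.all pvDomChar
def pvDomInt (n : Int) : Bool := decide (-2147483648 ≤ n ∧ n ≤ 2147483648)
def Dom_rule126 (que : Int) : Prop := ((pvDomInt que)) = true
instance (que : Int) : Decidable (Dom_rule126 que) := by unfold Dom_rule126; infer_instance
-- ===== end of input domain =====

-- B replaces A's per-cell double loop by a few whole-word bitwise operations
-- (two one-bit circular rotations of the 64-bit word); objective: alternative algorithm.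

-- ===== PORT A =====
-- literal port of A: for i in range(64): jd = sum over j in range(-1, 2) of que >> ((i+j) % 64) & 1;
-- if 0 < jd < 3: ans |= 1 << i  (shift amounts are the nonnegative values (i+j) % 64, hence .toNat is exact)
def rule126 (que : Int) : Int :=
  (PySem.List.pyRange 0 64 1).foldl (fun ans i =>
    let jd := (PySem.List.pyRange (-1) 2 1).foldl (fun jd j =>
      jd + PySem.Int.band (que >>> (PySem.Int.mod (i + j) 64).toNat) 1) 0
    if 0 < jd ∧ jd < 3 then PySem.Int.bor ans (1 <<< i.toNat) else ans) 0

-- ===== PORT B =====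
-- literal port of B: mask que to 64 bits, rotate one bit each way, combine bitwise.
def rule126_alt (que : Int) : Int :=
  let mask : Int := (1 : Int) <<< (64 : Nat) - 1
  let m := PySem.Int.band que mask
  let l := PySem.Int.band (PySem.Int.bor (m >>> (1:Nat)) (m <<< (63:Nat))) mask
  let r := PySem.Int.band (PySem.Int.bor (m <<< (1:Nat)) (m >>> (63:Nat))) mask
  PySem.Int.bxor (PySem.Int.bor (PySem.Int.bor l m) r) (PySem.Int.band (PySem.Int.band l m) r)

-- ===== PRECONDITION & SPEC =====
def Spec_rule126 (que : Int) (out : Int) : Prop := out = rule126_alt que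
instance (que : Int) (out : Int) : Decidable (Spec_rule126 que out) := by unfold Spec_rule126; infer_instance

-- ===== CLAIM (what is proved, stated in full; the proofs are below) =====
def Claim_equal_rule126 : Prop := ∀ (que : Int), Dom_rule126 que → Spec_rule126 que (rule126 que)

-- ===== LEMMAS AND PROOFS =====

-- the low 64 bits of que, as a natural number
def lowN (que : Int) : Nat := (que % 18446744073709551616).toNat

-- bit k of N as a 0/1 natural
def bitv (N k : Nat) : Nat := N >>> k &&& 1

-- A's neighbour condition at cell i, at the Nat level
def fA (N i : Nat) : Bool :=
  decide (0 < bitv N ((i + 63) % 64) + bitv N i + bitv N ((i + 1) % 64) ∧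
          bitv N ((i + 63) % 64) + bitv N i + bitv N ((i + 1) % 64) < 3)

-- A's result at the Nat level
def Anat (N : Nat) : Nat :=
  (List.range 64).foldl (fun a i => if fA N i then a ||| 1 <<< i else a) 0

-- B's result at the Nat level
def Bnat (N : Nat) : Nat :=
  let M : Nat := 2 ^ 64 - 1
  let l := (N >>> 1 ||| N <<< 63) &&& M
  let r := (N <<< 1 ||| N >>> 63) &&& M
  (l ||| N ||| r) ^^^ (l &&& N &&& r)

theorem lowN_lt (que : Int) : lowN que < 2 ^ 64 := by
  unfold lowN; omega

theorem natCast_lowN (que : Int) : ((lowN que : Nat) : Int) = que % 18446744073709551616 := by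
  unfold lowN; omega

-- key bit lemma: (que >> k) & 1 reads bit k of the low 64 bits of que, for k < 64
theorem band_shift_one (que : Int) (k : Nat) (hk : k < 64) :
    PySem.Int.band (que >>> k) 1 = ((bitv (lowN que) k : Nat) : Int) := by
  rw [PySem.Int.band_one]
  rw [show PySem.Int.mod (que >>> k) 2 = (que >>> k) % 2 by
    simp [PySem.Int.mod, Int.fmod_eq_emod]]
  rw [Int.shiftRight_eq_div_pow]
  push_cast
  rw [show ((bitv (lowN que) k : Nat) : Int) = ((lowN que : Nat) : Int) / 2 ^ k % 2 by
    unfold bitv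
    rw [Nat.and_one_is_mod, Nat.shiftRight_eq_div_pow]
    push_cast [Int.natCast_ediv]
    norm_num]
  rw [natCast_lowN]
  obtain ⟨e, he⟩ : ∃ e, 64 = k + (e + 1) := ⟨63 - k, by omega⟩
  set C : Int := 18446744073709551616 with hC
  have hCpow : C = 2 ^ (e + 1) * 2 ^ k := by
    rw [hC, ← pow_add]
    norm_num [show e + 1 + k = 64 by omega]
  have hque : que = que % C + (2 ^ (e + 1) * (que / C)) * 2 ^ k := by
    have := Int.emod_add_mul_ediv que C
    calc que = que % C + C * (que / C) := by omega
    _ = que % C + (2 ^ (e + 1) * (que / C)) * 2 ^ k := by rw [hCpow]; ring_nf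
  have hdiv : que / 2 ^ k = que % C / 2 ^ k + 2 ^ (e + 1) * (que / C) := by
    conv_lhs => rw [hque]
    exact Int.add_mul_ediv_right _ _ (by positivity)
  rw [hdiv]
  rw [show (2:Int) ^ (e + 1) * (que / C) = (2 ^ e * (que / C)) * 2 by ring]
  generalize que % C / 2 ^ k = t
  generalize (2:Int) ^ e * (que / C) = u
  omega

theorem pyRange_64 : PySem.List.pyRange 0 64 1 = (List.range 64).map (fun i => (i : Int)) := by
  decide

theorem pyRange_j : PySem.List.pyRange (-1) 2 1 = [-1, 0, 1] := by decide

-- one iteration of A's loop matches the Nat-level step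
theorem stepA_eq (que : Int) (a : Nat) (i : Nat) (hi : i < 64) :
    (let jd := (PySem.List.pyRange (-1) 2 1).foldl (fun jd j =>
        jd + PySem.Int.band (que >>> (PySem.Int.mod ((i : Int) + j) 64).toNat) 1) 0
     if 0 < jd ∧ jd < 3 then PySem.Int.bor ((a : Nat) : Int) (1 <<< ((i : Int)).toNat)
     else ((a : Nat) : Int))
    = (((if fA (lowN que) i then a ||| 1 <<< i else a : Nat) : Nat) : Int) := by
  rw [pyRange_j]
  simp only [List.foldl_cons, List.foldl_nil]
  have hmod : ∀ z : Int, PySem.Int.mod z 64 = z % 64 := fun z => by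
    simp [PySem.Int.mod, Int.fmod_eq_emod]
  have k1 : (PySem.Int.mod ((i : Int) + -1) 64).toNat = (i + 63) % 64 := by
    rw [hmod]; omega
  have k2 : (PySem.Int.mod ((i : Int) + 0) 64).toNat = i := by rw [hmod]; omega
  have k3 : (PySem.Int.mod ((i : Int) + 1) 64).toNat = (i + 1) % 64 := by rw [hmod]; omega
  simp only [k1, k2, k3,
    band_shift_one que ((i + 63) % 64) (by omega),
    band_shift_one que i hi,
    band_shift_one que ((i + 1) % 64) (by omega)]
  set N := lowN que
  by_cases hf : fA N i
  · have hc : (0:Int) < 0 + ↑(bitv N ((i + 63) % 64)) + ↑(bitv N i) + ↑(bitv N ((i + 1) % 64)) ∧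
        (0:Int) + ↑(bitv N ((i + 63) % 64)) + ↑(bitv N i) + ↑(bitv N ((i + 1) % 64)) < 3 := by
      unfold fA at hf
      simp only [decide_eq_true_eq] at hf
      constructor <;> [skip; push_cast] <;> omega
    rw [if_pos hc, if_pos hf]
    rw [Int.toNat_natCast, PySem.Int.bor_natCast]
  · have hc : ¬ ((0:Int) < 0 + ↑(bitv N ((i + 63) % 64)) + ↑(bitv N i) + ↑(bitv N ((i + 1) % 64)) ∧
        (0:Int) + ↑(bitv N ((i + 63) % 64)) + ↑(bitv N i) + ↑(bitv N ((i + 1) % 64)) < 3) := by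
      unfold fA at hf
      simp only [decide_eq_true_eq] at hf
      intro ⟨h1, h2⟩
      apply hf
      constructor <;> [skip; push_cast at h2] <;> omega
    rw [if_neg hc, if_neg hf]

-- A's port equals the Nat-level fold over its low 64 bits
theorem ruleA_eq_Anat (que : Int) : rule126 que = ((Anat (lowN que) : Nat) : Int) := by
  unfold rule126 Anat
  rw [pyRange_64, List.foldl_map]
  have main : ∀ c : Nat, c ≤ 64 → ∀ a : Nat,
      (List.range c).foldl (fun ans i =>
        let jd := (PySem.List.pyRange (-1) 2 1).foldl (fun jd j =>
          jd + PySem.Int.band (que >>> (PySem.Int.mod ((i : Nat) + j) 64).toNat) 1) 0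
        if 0 < jd ∧ jd < 3 then PySem.Int.bor ans (1 <<< ((i : Nat) : Int).toNat) else ans)
        ((a : Nat) : Int)
      = (((List.range c).foldl (fun a i => if fA (lowN que) i then a ||| 1 <<< i else a) a : Nat) : Int) := by
    intro c
    induction c with
    | zero => intro _ a; simp
    | succ c ih =>
      intro hc a
      rw [List.range_succ, List.foldl_append, List.foldl_append]
      simp only [List.foldl_cons, List.foldl_nil]
      rw [ih (by omega) a]
      exact stepA_eq que _ c (by omega)
  exact main 64 (by omega) 0

-- B's port equals the Nat-level bitwise formula on its low 64 bits
theorem ruleB_eq_Bnat (que : Int) : rule126_alt que = ((Bnat (lowN que) : Nat) : Int) := by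
  have hm : PySem.Int.band que ((1:Int) <<< (64:Nat) - 1) = ((lowN que : Nat) : Int) := by
    have hmask : ((1:Int) <<< (64:Nat)) - 1 = ((18446744073709551615 : Nat) : Int) := by decide
    rw [hmask]
    by_cases hq : 0 ≤ que
    · rw [PySem.Int.band_of_nonneg hq (by positivity)]
      have h1 : que.toNat &&& ((18446744073709551615 : Nat):Int).toNat = que.toNat % 2 ^ 64 := by
        rw [Int.toNat_natCast]
        rw [show (18446744073709551615 : Nat) = 2 ^ 64 - 1 by norm_num,
          Nat.and_two_pow_sub_one_eq_mod]
      rw [h1]; unfold lowN; omega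
    · unfold PySem.Int.band
      rw [if_neg hq, if_pos (by positivity)]
      have h1 : ((18446744073709551615 : Nat):Int).toNat &&& (-que - 1).toNat
          = (-que - 1).toNat % 2 ^ 64 := by
        rw [Int.toNat_natCast]
        rw [show (18446744073709551615 : Nat) = 2 ^ 64 - 1 by norm_num, Nat.and_comm,
          Nat.and_two_pow_sub_one_eq_mod]
      rw [h1, Int.toNat_natCast]
      unfold lowN; omega
  simp only [rule126_alt, Bnat, hm]
  set N := lowN que
  have hmask2 : ((1:Int) <<< (64:Nat)) - 1 = ((18446744073709551615 : Nat) : Int) := by decide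
  simp only [hmask2, ← Int.natCast_shiftRight, ← Int.natCast_shiftLeft,
    PySem.Int.bor_natCast, PySem.Int.band_natCast, PySem.Int.bxor_natCast]
  norm_num

-- bit j of A's fold is (j < 64 && fA N j)
theorem testBit_foldA (f : Nat → Bool) (c j : Nat) :
    ((List.range c).foldl (fun a i => if f i then a ||| 1 <<< i else a) 0).testBit j
      = (decide (j < c) && f j) := by
  induction c with
  | zero => simp
  | succ c ih =>
    rw [List.range_succ, List.foldl_append]
    simp only [List.foldl_cons, List.foldl_nil]
    by_cases hf : f c
    · rw [if_pos hf, Nat.testBit_or, ih]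
      rw [show (1 <<< c : Nat) = 2 ^ c by rw [Nat.shiftLeft_eq]; omega, Nat.testBit_two_pow]
      by_cases hj : j = c
      · subst hj
        simp [hf]
      · by_cases hj2 : j < c
        · simp [show j < c + 1 by omega, hj2, show ¬ (c = j) from fun h => hj h.symm]
        · simp [hj2, show ¬ (j < c + 1) by omega, show ¬ (c = j) from fun h => hj h.symm]
    · rw [if_neg hf, ih]
      by_cases hj : j = c
      · subst hj; simp [hf]
      · by_cases hj2 : j < c
        · simp [hj2, show j < c + 1 by omega]
        · simp [hj2, show ¬ (j < c + 1) by omega]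

-- bitv is the 0/1 value of a testBit
theorem bitv_eq_testBit (N k : Nat) : bitv N k = (N.testBit k).toNat := by
  unfold bitv
  rw [Nat.toNat_testBit, Nat.and_one_is_mod, Nat.shiftRight_eq_div_pow]

-- high bits of a 64-bit number are 0
theorem testBit_high {N : Nat} (hN : N < 2 ^ 64) {k : Nat} (hk : 64 ≤ k) :
    N.testBit k = false :=
  Nat.testBit_lt_two_pow (lt_of_lt_of_le hN (Nat.pow_le_pow_right (by omega) hk))

-- the per-bit equivalence of the two formulas
theorem Anat_eq_Bnat {N : Nat} (hN : N < 2 ^ 64) : Anat N = Bnat N := by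
  apply Nat.eq_of_testBit_eq
  intro j
  unfold Anat Bnat
  rw [testBit_foldA]
  simp only [Nat.testBit_xor, Nat.testBit_or, Nat.testBit_and, Nat.testBit_shiftLeft,
    Nat.testBit_shiftRight, Nat.testBit_two_pow_sub_one]
  by_cases hj : j < 64
  · rw [show fA N j =
        decide (0 < bitv N ((j + 63) % 64) + bitv N j + bitv N ((j + 1) % 64) ∧
                bitv N ((j + 63) % 64) + bitv N j + bitv N ((j + 1) % 64) < 3) from rfl]
    simp only [bitv_eq_testBit]
    by_cases h0 : j = 0
    · subst h0
      norm_num [-Nat.testBit_zero]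
      generalize N.testBit 63 = x
      generalize N.testBit 0 = y
      generalize N.testBit 1 = z
      cases x <;> cases y <;> cases z <;> decide
    · by_cases h63 : j = 63
      · subst h63
        norm_num [-Nat.testBit_zero]
        rw [testBit_high hN (show (64:Nat) ≤ 64 by norm_num),
            testBit_high hN (show (64:Nat) ≤ 126 by norm_num)]
        generalize N.testBit 62 = x
        generalize N.testBit 63 = y
        generalize N.testBit 0 = z
        cases x <;> cases y <;> cases z <;> decide
      · have hm1 : (j + 63) % 64 = j - 1 := by omega
        have hp1 : (j + 1) % 64 = j + 1 := by omega
        rw [hm1, hp1]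
        rw [show N.testBit (1 + j) = N.testBit (j + 1) by rw [Nat.add_comm],
            testBit_high hN (show (64:Nat) ≤ 63 + j by omega)]
        simp only [show decide (j ≥ 63) = false by simp; omega,
          show decide (j ≥ 1) = true by simp; omega,
          show decide (j < 64) = true by simp; omega,
          Bool.false_and, Bool.or_false, Bool.true_and, Bool.and_true]
        generalize N.testBit (j - 1) = x
        generalize N.testBit j = y
        generalize N.testBit (j + 1) = z
        cases x <;> cases y <;> cases z <;> decide
  · simp only [show decide (j < 64) = false by simp; omega, Bool.false_and, Bool.and_false,
      Bool.or_false, testBit_high hN (show (64:Nat) ≤ j by omega)]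
    simp

-- ===== VERDICT (by name: the statement is the Claim_ definition above) =====
theorem rule126_spec : Claim_equal_rule126 := by
  intro que _
  unfold Spec_rule126
  rw [ruleA_eq_Anat, ruleB_eq_Bnat, Anat_eq_Bnat (lowN_lt que)]
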